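-- pv_equiv track=rewrite | github.com/Alpaca-Network/gatewayz-backend | src/utils/auto_sentry.py | _contains_sensitive_data
-- ===== SOURCE A (Python) =====
-- from typing import Any, TypeVar
--
-- def _contains_sensitive_data(params: dict[str, Any]) -> bool:
--     """
--     Check if parameters contain sensitive data that shouldn't be logged.
--
--     Returns True if sensitive data is detected.
--     """
--     sensitive_keywords = [
--         "password",
--         "secret",
--         "token",
--         "api_key",
--         "private_key",
--         "credit_card",
--         "ssn",
--         "apikey",
--     ]
--
--     for key in params.keys():
--         key_lower = key.lower()
--         if any(keyword in key_lower for keyword in sensitive_keywords):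
--             return True
--
--     return False
-- ===== SOURCE B (Python) =====
-- def _contains_sensitive_data(params: dict) -> bool:
--     """
--     Check if parameters contain sensitive data that shouldn't be logged.
--
--     Returns True if sensitive data is detected.
--     """
--     sensitive_keywords = [
--         "password",
--         "secret",
--         "token",
--         "api_key",
--         "private_key",
--         "credit_card",
--         "ssn",
--         "apikey",
--     ]
--     # No keyword contains a newline, so a keyword occurs in some key
--     # iff it occurs in the newline-joined blob of lowercased keys.
--     blob = "\n".join(key.lower() for key in params)
--     return any(keyword in blob for keyword in sensitive_keywords)
-- ===== Notes on version B (the rewrite author's own statement) =====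
-- stated objective: faster
-- what changed: B joins all lowercased keys into one newline-separated blob (newline occurs in no keyword) and scans each keyword once over that blob, instead of A's per-key loop with an inner per-keyword substring test.
import Mathlib
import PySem

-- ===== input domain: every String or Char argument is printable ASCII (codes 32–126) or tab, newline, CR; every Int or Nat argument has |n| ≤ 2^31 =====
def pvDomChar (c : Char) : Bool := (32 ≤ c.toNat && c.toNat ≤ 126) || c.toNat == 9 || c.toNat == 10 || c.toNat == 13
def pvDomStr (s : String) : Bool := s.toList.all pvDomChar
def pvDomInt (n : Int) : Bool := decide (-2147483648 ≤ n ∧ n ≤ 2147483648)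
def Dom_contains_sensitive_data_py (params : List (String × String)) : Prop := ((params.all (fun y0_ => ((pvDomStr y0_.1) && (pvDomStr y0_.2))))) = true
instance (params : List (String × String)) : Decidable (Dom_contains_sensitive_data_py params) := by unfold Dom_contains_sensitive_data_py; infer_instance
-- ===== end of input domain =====

-- B joins the lowercased keys with "\n" (a character no keyword contains) into one blob
-- and scans each keyword once over it, instead of A's per-key inner keyword loop (objective: alternative).

-- the sensitive keyword list (defined inline in both Pythons)
def pvSensitiveKeywords : List String :=
  ["password", "secret", "token", "api_key", "private_key", "credit_card", "ssn", "apikey"]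

-- ===== PORT A =====
-- for key in params.keys(): if any(keyword in key.lower() for keyword in sensitive_keywords): return True
def contains_sensitive_data_py (params : List (String × String)) : Bool :=
  match params with
  | [] => false
  | (key, _) :: rest =>
    let key_lower := PySem.Str.lower key
    if pvSensitiveKeywords.any (fun keyword => PySem.Str.isIn keyword key_lower) then
      true
    else
      contains_sensitive_data_py rest

-- ===== PORT B =====
-- blob = "\n".join(key.lower() for key in params); any(keyword in blob for keyword in sensitive_keywords)
def contains_sensitive_data_py_alt (params : List (String × String)) : Bool :=
  let blob := PySem.Str.join "\n" (params.map (fun p => PySem.Str.lower p.1))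
  pvSensitiveKeywords.any (fun keyword => PySem.Str.isIn keyword blob)

-- ===== PRECONDITION & SPEC =====
def Spec_contains_sensitive_data_py (params : List (String × String)) (out : Bool) : Prop := out = contains_sensitive_data_py_alt params
instance (params : List (String × String)) (out : Bool) : Decidable (Spec_contains_sensitive_data_py params out) := by unfold Spec_contains_sensitive_data_py; infer_instance

-- ===== CLAIM (what is proved, stated in full; the proofs are below) =====
def Claim_equal_contains_sensitive_data_py : Prop := ∀ (params : List (String × String)), Dom_contains_sensitive_data_py params → Spec_contains_sensitive_data_py params (contains_sensitive_data_py params)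

-- ===== LEMMAS AND PROOFS =====

-- a list `w` not containing `c` is a prefix of `a ++ c :: b` iff it is a prefix of `a`
lemma pv_prefix_append_cons {w : List Char} {c : Char} (hc : c ∉ w) :
    ∀ (a b : List Char), w <+: a ++ c :: b ↔ w <+: a := by
  induction w with
  | nil => intro a b; simp
  | cons y w' ih =>
    intro a b
    cases a with
    | nil =>
      simp only [List.nil_append, List.cons_prefix_cons]
      constructor
      · rintro ⟨rfl, -⟩; exact absurd (List.mem_cons_self ..) hc
      · intro h; exact absurd h (by simp)
    | cons x a' =>
      simp only [List.cons_append, List.cons_prefix_cons]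
      have hc' : c ∉ w' := fun h => hc (List.mem_cons_of_mem _ h)
      rw [ih hc' a' b]

-- a list `w` not containing `c` is infix of `a ++ c :: b` iff it is infix of `a` or of `b`
lemma pv_infix_append_cons {w : List Char} {c : Char} (hc : c ∉ w) (a b : List Char) :
    w <:+: a ++ c :: b ↔ w <:+: a ∨ w <:+: b := by
  induction a with
  | nil =>
    simp only [List.nil_append, List.infix_cons_iff]
    constructor
    · rintro (hp | hi)
      · cases w with
        | nil => exact Or.inl List.nil_infix
        | cons y w' =>
          rw [List.cons_prefix_cons] at hp
          exact absurd (hp.1 ▸ List.mem_cons_self ..) hc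
      · exact Or.inr hi
    · rintro (ha | hb)
      · rcases List.eq_nil_of_infix_nil ha with rfl
        exact Or.inl List.nil_prefix
      · exact Or.inr hb
  | cons x a' ih =>
    rw [List.cons_append, List.infix_cons_iff, List.infix_cons_iff,
        show x :: (a' ++ c :: b) = (x :: a') ++ c :: b from rfl,
        pv_prefix_append_cons hc (x :: a') b, ih]
    tauto

-- a `c`-free word occurs in the `c`-joined blob iff it occurs in some part
lemma pv_isIn_join {w : List Char} {c : Char} (hc : c ∉ w) (hne : w ≠ [])
    (parts : List (List Char)) :
    PySem.Chars.isIn w (PySem.Chars.join [c] parts) = parts.any (fun p => PySem.Chars.isIn w p) := by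
  induction parts with
  | nil =>
    rw [PySem.Chars.join_nil, List.any_nil, Bool.eq_iff_iff]
    simp only [PySem.Chars.isIn_iff_infix]
    constructor
    · intro h; exact absurd (List.eq_nil_of_infix_nil h) hne
    · intro h; exact absurd h (by simp)
  | cons p rest ih =>
    cases rest with
    | nil =>
      simp [PySem.Chars.join_singleton]
    | cons q rest' =>
      rw [PySem.Chars.join_cons_cons, List.any_cons, Bool.eq_iff_iff]
      simp only [PySem.Chars.isIn_iff_infix, Bool.or_eq_true,
        show p ++ [c] ++ PySem.Chars.join [c] (q :: rest') = p ++ c :: PySem.Chars.join [c] (q :: rest') from by simp,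
        pv_infix_append_cons hc]
      rw [← PySem.Chars.isIn_iff_infix, ← PySem.Chars.isIn_iff_infix, ih]

lemma pv_any_congr_mem {α : Type} {l : List α} {p q : α → Bool}
    (h : ∀ a ∈ l, p a = q a) : l.any p = l.any q := by
  induction l with
  | nil => rfl
  | cons x xs ih =>
    simp only [List.any_cons, h x (List.mem_cons_self ..),
      ih (fun a ha => h a (List.mem_cons_of_mem _ ha))]

-- each keyword occurs in the blob iff it occurs in some lowercased key
lemma pv_keyword_in_blob (kw : String) (hc : ('\n' : Char) ∉ kw.toList) (hne : kw.toList ≠ [])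
    (params : List (String × String)) :
    PySem.Str.isIn kw (PySem.Str.join "\n" (params.map (fun p => PySem.Str.lower p.1)))
      = params.any (fun p => PySem.Str.isIn kw (PySem.Str.lower p.1)) := by
  rw [PySem.Str.isIn_eq, PySem.Str.toList_join,
    show ("\n" : String).toList = ['\n'] from rfl,
    pv_isIn_join hc hne, List.map_map]
  rw [Bool.eq_iff_iff]
  simp [PySem.Str.isIn_eq]

-- A's early-return loop is `any` over the keys
lemma pv_A_eq_any (params : List (String × String)) :
    contains_sensitive_data_py params
      = params.any (fun p => pvSensitiveKeywords.any (fun kw => PySem.Str.isIn kw (PySem.Str.lower p.1))) := by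
  induction params with
  | nil => rfl
  | cons hd tl ih =>
    rw [contains_sensitive_data_py, List.any_cons, ih]
    split <;> simp_all

-- ===== VERDICT (by name: the statement is the Claim_ definition above) =====
theorem contains_sensitive_data_py_spec : Claim_equal_contains_sensitive_data_py := by
  intro params _
  unfold Spec_contains_sensitive_data_py contains_sensitive_data_py_alt
  rw [pv_A_eq_any]
  rw [pv_any_congr_mem (l := pvSensitiveKeywords)
        (q := fun kw => params.any (fun p => PySem.Str.isIn kw (PySem.Str.lower p.1)))
        (fun kw hkw => pv_keyword_in_blob kw
          (by fin_cases hkw <;> decide) (by fin_cases hkw <;> decide) params)]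
  rw [Bool.eq_iff_iff]
  simp only [List.any_eq_true]
  tauto
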